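-- pv_equiv track=rewrite | github.com/arnabid/edrepublic-Questions | shiftingWords.py | isClassicWord
-- ===== SOURCE A (Python) =====
-- def isClassicWord(s, m):
--     count = 0
--     k = len(s)
--     doubles = s + s
--     for i in range(k):
--         if doubles[i:i+k] == s:
--             count += 1
--     return count == m
-- ===== SOURCE B (Python) =====
-- def isClassicWord(s, m):
--     k = len(s)
--     t = s + s
--     for p in range(1, k + 1):
--         if t[p:p+k] == s:
--             return k // p == m
--     return 0 == m
-- ===== Notes on version B (the rewrite author's own statement) =====
-- stated objective: alternative
-- what changed: Instead of counting all k rotations that equal s, B finds the smallest rotation period p (first matching shift, early exit) and returns k // p == m, relying on the fact that matching shifts are exactly the multiples of the smallest one.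
import Mathlib
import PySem

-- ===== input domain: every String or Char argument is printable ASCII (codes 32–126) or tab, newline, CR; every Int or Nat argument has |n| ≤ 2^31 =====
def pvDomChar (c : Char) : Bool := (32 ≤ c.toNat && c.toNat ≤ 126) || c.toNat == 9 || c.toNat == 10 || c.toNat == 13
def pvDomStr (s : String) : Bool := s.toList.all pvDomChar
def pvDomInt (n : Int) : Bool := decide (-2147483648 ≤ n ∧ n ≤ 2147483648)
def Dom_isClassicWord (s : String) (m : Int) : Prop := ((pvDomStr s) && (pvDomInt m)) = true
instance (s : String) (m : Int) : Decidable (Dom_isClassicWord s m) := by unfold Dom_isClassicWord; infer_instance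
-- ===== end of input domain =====

-- B replaces A's count-all-rotations loop by a search for the FIRST matching shift p (the smallest
-- rotation period) and returns k // p == m; alternative algorithm, early exit, same worst case.

-- ===== PORT A =====
-- A: count = number of i in range(k) with (s+s)[i:i+k] == s; return count == m
def isClassicWord (s : String) (m : Int) : Bool :=
  let cs := s.toList
  let k : Int := PySem.Str.len s
  let doubles := cs ++ cs
  let count : Int := (PySem.List.pyRange 0 k 1).foldl
    (fun c i => if PySem.List.slice doubles (some i) (some (i + k)) = cs then c + 1 else c) 0
  count == m

-- ===== PORT B =====
-- B: first p in range(1, k+1) with (s+s)[p:p+k] == s decides via k // p == m; if none (k = 0), 0 == m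
def isClassicWord_alt (s : String) (m : Int) : Bool :=
  let cs := s.toList
  let k : Int := PySem.Str.len s
  let t := cs ++ cs
  match (PySem.List.pyRange 1 (k + 1) 1).find?
      (fun p => PySem.List.slice t (some p) (some (p + k)) == cs) with
  | some p => PySem.Int.floordiv k p == m
  | none => decide ((0 : Int) = m)

-- ===== PRECONDITION & SPEC =====
def Spec_isClassicWord (s : String) (m : Int) (out : Bool) : Prop := out = isClassicWord_alt s m
instance (s : String) (m : Int) (out : Bool) : Decidable (Spec_isClassicWord s m out) := by unfold Spec_isClassicWord; infer_instance

-- ===== CLAIM (what is proved, stated in full; the proofs are below) =====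
def Claim_equal_isClassicWord : Prop := ∀ (s : String) (m : Int), Dom_isClassicWord s m → Spec_isClassicWord s m (isClassicWord s m)

-- ===== LEMMAS AND PROOFS =====

-- the slice of the doubled word at shift i is the i-th rotation
theorem pv_slice_rotate (l : List Char) (i : Nat) (h : i ≤ l.length) :
    PySem.List.slice (l ++ l) (some (i : Int)) (some ((i : Int) + (l.length : Int))) = l.rotate i := by
  have hc : (i : Int) + (l.length : Int) = ((i + l.length : Nat) : Int) := by push_cast; ring
  rw [hc, PySem.List.slice_natCast, List.rotate_eq_drop_append_take h, List.drop_append,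
    Nat.sub_eq_zero_of_le h, List.drop_zero, List.take_append, List.length_drop]
  have h3 : i + l.length - i = l.length := by omega
  rw [h3, List.take_of_length_le (by rw [List.length_drop]; omega)]
  have h4 : l.length - (l.length - i) = i := by omega
  rw [h4]

-- the same with an Int index
theorem pv_slice_rotate_int (l : List Char) (x : Int) (h0 : 0 ≤ x) (h1 : x ≤ (l.length : Int)) :
    PySem.List.slice (l ++ l) (some x) (some (x + (l.length : Int))) = l.rotate x.toNat := by
  have hx : x = ((x.toNat : Nat) : Int) := by omega
  rw [hx]
  exact pv_slice_rotate l x.toNat (by omega)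

-- multiples of p among 0, …, p*q - 1 number exactly q
theorem pv_count_multiples (p : Nat) (hp : 0 < p) (q : Nat) :
    (List.range (p * q)).countP (fun i => decide (p ∣ i)) = q := by
  induction q with
  | zero => simp
  | succ q ih =>
    have hmul : p * (q + 1) = p * q + p := by ring
    rw [hmul, List.range_add, List.countP_append, ih, List.countP_map]
    have hblock : (List.range p).countP ((fun i => decide (p ∣ i)) ∘ (fun x => p * q + x)) = 1 := by
      have hcg : (List.range p).countP ((fun i => decide (p ∣ i)) ∘ (fun x => p * q + x))
          = (List.range p).countP (fun j => decide (j = 0)) := by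
        apply List.countP_congr
        intro j hj
        have hjp : j < p := List.mem_range.mp hj
        simp only [Function.comp_apply, decide_eq_true_eq]
        constructor
        · intro hd
          have hpj : p ∣ j := (Nat.dvd_add_right (Dvd.intro q rfl)).mp hd
          rcases Nat.eq_zero_or_pos j with h0 | h0
          · exact h0
          · exact absurd (Nat.le_of_dvd h0 hpj) (by omega)
        · rintro rfl; simp
      rw [hcg]
      obtain ⟨pp, rfl⟩ : ∃ pp, p = pp + 1 := ⟨p - 1, by omega⟩
      rw [List.range_succ_eq_map, List.countP_cons, List.countP_map]
      simp
    omega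

-- fold-counting matches is countP over range
theorem pv_countA (l : List Char) :
    ((PySem.List.pyRange 0 (l.length : Int) 1).foldl
      (fun c i => if PySem.List.slice (l ++ l) (some i) (some (i + (l.length : Int))) = l
        then c + 1 else c) (0 : Int))
    = ((List.range l.length).countP (fun j => decide (l.rotate j = l)) : Int) := by
  rw [PySem.List.pyRange_zero_nat, List.foldl_map]
  have hfc := PySem.List.foldl_count_if
    (fun j : Nat => decide (PySem.List.slice (l ++ l) (some (j : Int)) (some ((j : Int) + (l.length : Int))) = l))
    (List.range l.length) 0
  simp only [decide_eq_true_eq] at hfc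
  rw [hfc, zero_add]
  congr 1
  apply List.countP_congr
  intro j hj
  have hjn : j < l.length := List.mem_range.mp hj
  rw [pv_slice_rotate l j (le_of_lt hjn)]

-- the whole equivalence, at the level of the character list
theorem pv_main (l : List Char) (m : Int) :
    ((PySem.List.pyRange 0 (l.length : Int) 1).foldl
      (fun c i => if PySem.List.slice (l ++ l) (some i) (some (i + (l.length : Int))) = l
        then c + 1 else c) (0 : Int) == m)
    = (match (PySem.List.pyRange 1 ((l.length : Int) + 1) 1).find?
        (fun p => PySem.List.slice (l ++ l) (some p) (some (p + (l.length : Int))) == l) with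
      | some p => PySem.Int.floordiv (l.length : Int) p == m
      | none => decide ((0 : Int) = m)) := by
  rcases Nat.eq_zero_or_pos l.length with hn | hn
  · -- empty word: count is 0, the search range is empty
    obtain rfl : l = [] := List.eq_nil_of_length_eq_zero hn
    have e1 : PySem.List.pyRange 0 ((List.length ([] : List Char) : Int)) 1 = [] :=
      PySem.List.pyRange_one_eq_nil (by simp)
    have e2 : PySem.List.pyRange 1 ((List.length ([] : List Char) : Int) + 1) 1 = [] :=
      PySem.List.pyRange_one_eq_nil (by simp)
    rw [e1, e2]
    simp only [List.foldl_nil, List.find?_nil]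
    rw [Bool.eq_iff_iff]
    simp [beq_iff_eq]
  · -- nonempty word: p₀ is the smallest matching shift
    have hex : ∃ p, 0 < p ∧ l.rotate p = l := ⟨l.length, hn, List.rotate_length l⟩
    set p₀ := Nat.find hex with hp₀def
    obtain ⟨hp₀pos, hp₀rot⟩ := Nat.find_spec hex
    have hp₀le : p₀ ≤ l.length := Nat.find_le ⟨hn, List.rotate_length l⟩
    have hp₀leZ : (p₀ : Int) ≤ (l.length : Int) := by exact_mod_cast hp₀le
    -- matching shifts are exactly the multiples of p₀
    have rot_mul : ∀ t, l.rotate (p₀ * t) = l := by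
      intro t
      induction t with
      | zero => simp
      | succ t ih =>
        have h : p₀ * (t + 1) = p₀ * t + p₀ := by ring
        rw [h, ← List.rotate_rotate, ih, hp₀rot]
    have dvd_iff : ∀ i : Nat, l.rotate i = l ↔ p₀ ∣ i := by
      intro i
      constructor
      · intro hrot
        have hi : i = p₀ * (i / p₀) + i % p₀ := (Nat.div_add_mod i p₀).symm
        have hr : l.rotate (i % p₀) = l := by
          rw [hi, ← List.rotate_rotate, rot_mul] at hrot
          exact hrot
        have hlt : i % p₀ < p₀ := Nat.mod_lt _ hp₀pos
        rcases Nat.eq_zero_or_pos (i % p₀) with h0 | h0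
        · exact Nat.dvd_of_mod_eq_zero h0
        · exact absurd ⟨h0, hr⟩ (Nat.find_min hex hlt)
      · rintro ⟨t, rfl⟩; exact rot_mul t
    obtain ⟨q, hq⟩ : p₀ ∣ l.length := (dvd_iff l.length).mp (List.rotate_length l)
    -- A's count is l.length / p₀
    have hA : ((List.range l.length).countP (fun j => decide (l.rotate j = l))) = l.length / p₀ := by
      have hcg : (List.range l.length).countP (fun j => decide (l.rotate j = l))
          = (List.range l.length).countP (fun j => decide (p₀ ∣ j)) := by
        apply List.countP_congr
        intro j _
        simp only [decide_eq_true_eq]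
        exact dvd_iff j
      rw [hcg, hq, pv_count_multiples p₀ hp₀pos q, Nat.mul_div_cancel_left q hp₀pos]
    -- B's search finds p₀
    have hpred : (PySem.List.slice (l ++ l) (some (p₀ : Int)) (some ((p₀ : Int) + (l.length : Int))) == l) = true := by
      rw [pv_slice_rotate_int l (p₀ : Int) (by positivity) hp₀leZ]
      simp only [Int.toNat_natCast, beq_iff_eq]
      exact hp₀rot
    have hnone : (PySem.List.pyRange 1 (p₀ : Int) 1).find?
        (fun p => PySem.List.slice (l ++ l) (some p) (some (p + (l.length : Int))) == l) = none := by
      rw [List.find?_eq_none]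
      intro x hx
      obtain ⟨hx1, hx2⟩ := PySem.List.mem_pyRange_one.mp hx
      rw [pv_slice_rotate_int l x (by omega) (by omega)]
      simp only [beq_iff_eq]
      intro hrot
      exact Nat.find_min hex (show x.toNat < p₀ by omega) ⟨by omega, hrot⟩
    have hfind : (PySem.List.pyRange 1 ((l.length : Int) + 1) 1).find?
        (fun p => PySem.List.slice (l ++ l) (some p) (some (p + (l.length : Int))) == l)
        = some (p₀ : Int) := by
      rw [PySem.List.pyRange_one_append 1 (p₀ : Int) ((l.length : Int) + 1)
            (by exact_mod_cast hp₀pos) (by omega),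
          List.find?_append, hnone, Option.none_or,
          PySem.List.pyRange_one_cons (by omega)]
      exact List.find?_cons_of_pos hpred
    rw [pv_countA l, hA, hfind]
    simp [PySem.Int.floordiv_natCast]

-- ===== VERDICT (by name: the statement is the Claim_ definition above) =====
theorem isClassicWord_spec : Claim_equal_isClassicWord := by
  intro s m _
  unfold Spec_isClassicWord isClassicWord isClassicWord_alt
  simp only [PySem.Str.len_eq]
  exact pv_main s.toList m
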